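-- pv_equiv track=rewrite | github.com/K1521/geometricalgebra1 | old/blademulexplained.py | blademul6
-- ===== SOURCE A (Python) =====
-- def blademul6(b1,b2):
--     bas1acc=b1^(b1.bit_count()&1)#this is here because b1 is backwards
--     i=1
--     l=min(b1.bit_length(),b2.bit_length())
--     mask=(2<<l)-1
--     while i<=l:
--         bas1acc^=(bas1acc<<i)&mask
--         i<<=1
--     invert=(bas1acc&b2).bit_count()&1
--     return invert
-- ===== SOURCE B (Python) =====
-- def blademul6(b1, b2):
--     # parity of the number of (i, j) pairs with bit i set in b1, bit j set in b2, i > j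
--     a = b1 >> 1
--     total = 0
--     while a:
--         total += (a & b2).bit_count()
--         a >>= 1
--     return total & 1
-- ===== Notes on version B (the rewrite author's own statement) =====
-- stated objective: simpler
-- what changed: Replaces the parallel-prefix XOR scan (mask, doubling shifts, popcount-parity pre-flip of b1) with the canonical reordering-sign loop that directly counts, over all shift distances, pairs of a b1-bit strictly above a b2-bit and returns the parity of that count.
-- outside the precondition, e.g. on blademul6(-1, 2): A returns 1, B does not finish within the time limit; on blademul6(6, -1): A returns 0, B returns 1
import Mathlib
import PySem

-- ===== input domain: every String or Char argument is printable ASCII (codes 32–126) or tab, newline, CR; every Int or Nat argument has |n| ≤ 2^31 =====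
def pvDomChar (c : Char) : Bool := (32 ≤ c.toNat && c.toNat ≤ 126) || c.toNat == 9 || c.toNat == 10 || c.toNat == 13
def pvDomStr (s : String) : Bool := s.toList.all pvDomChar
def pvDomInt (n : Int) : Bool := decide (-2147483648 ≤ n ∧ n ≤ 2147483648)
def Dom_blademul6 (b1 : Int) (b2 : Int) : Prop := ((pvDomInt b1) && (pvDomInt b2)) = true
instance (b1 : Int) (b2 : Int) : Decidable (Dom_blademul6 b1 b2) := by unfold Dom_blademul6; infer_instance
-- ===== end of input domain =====

-- B replaces A's parallel-prefix XOR scan by the canonical reordering-sign loop (simpler);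
-- equivalence is claimed on nonnegative blade bitmasks (Pre_), the function's natural domain.

-- ===== PORT A =====
-- the 'while i<=l' loop; i starts at 1 and doubles, so the '1 ≤ i' conjunct holds at every
-- call and only makes termination evident (the computation is unchanged)
def blademulLoopA (l : Nat) (mask : Int) (i : Nat) (acc : Int) : Int :=
  if 1 ≤ i ∧ i ≤ l then
    blademulLoopA l mask (i <<< 1) (PySem.Int.bxor acc (PySem.Int.band (acc <<< i) mask))
  else acc
termination_by l + 1 - i
decreasing_by simp [Nat.shiftLeft_eq]; omega

def blademul6 (b1 : Int) (b2 : Int) : Int :=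
  let bas1acc := PySem.Int.bxor b1 (PySem.Int.band (PySem.Int.bitCount b1 : Int) 1)
  let l := min (PySem.Int.bitLength b1) (PySem.Int.bitLength b2)
  let mask : Int := (2 <<< l) - 1
  let acc := blademulLoopA l mask 1 bas1acc
  PySem.Int.band (PySem.Int.bitCount (PySem.Int.band acc b2) : Int) 1

-- ===== PORT B =====
-- the 'while a' loop; a = b1 >> 1 is nonnegative on Pre_, where 'a != 0' is '0 < a'
-- (the '0 < a' guard also makes termination evident)
def blademulLoopB (b2 : Int) (a : Int) (total : Int) : Int :=
  if 0 < a then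
    blademulLoopB b2 (a >>> (1:Nat)) (total + (PySem.Int.bitCount (PySem.Int.band a b2) : Int))
  else total
termination_by a.toNat
decreasing_by
  have ha : a = ((a.toNat : Nat) : Int) := by omega
  rw [ha]
  show ((((a.toNat : Nat) >>> 1 : Nat) : Int)).toNat < a.toNat
  simp [Nat.shiftRight_one]
  omega

def blademul6_alt (b1 : Int) (b2 : Int) : Int :=
  PySem.Int.band (blademulLoopB b2 (b1 >>> (1:Nat)) 0) 1

-- ===== PRECONDITION & SPEC =====
-- Pre_ restricts to nonnegative arguments: blades are bitmasks of basis vectors, so negative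
-- ints are outside the function's natural domain (A returns accidental values there computed
-- from two's-complement bit patterns, and B's loop does not terminate on negative b1).
def Pre_blademul6 (b1 : Int) (b2 : Int) : Prop := 0 ≤ b1 ∧ 0 ≤ b2
instance (b1 : Int) (b2 : Int) : Decidable (Pre_blademul6 b1 b2) := by unfold Pre_blademul6; infer_instance
def pvWitness_blademul6 : Int × Int := (6, 5)

def Spec_blademul6 (b1 : Int) (b2 : Int) (out : Int) : Prop := out = blademul6_alt b1 b2
instance (b1 : Int) (b2 : Int) (out : Int) : Decidable (Spec_blademul6 b1 b2 out) := by unfold Spec_blademul6; infer_instance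

-- ===== CLAIM (what is proved, stated in full; the proofs are below) =====
def Claim_equal_blademul6 : Prop := ∀ (b1 : Int) (b2 : Int), Dom_blademul6 b1 b2 → Pre_blademul6 b1 b2 → Spec_blademul6 b1 b2 (blademul6 b1 b2)

-- ===== LEMMAS AND PROOFS =====

-- Nat-level twins of the two loops, and popcount/parity over Nat
def pcN (m : Nat) : Nat := PySem.Int.bitCount (m : Int)
def parN (m : Nat) : Bool := pcN m % 2 == 1
def blenN (m : Nat) : Nat := PySem.Int.bitLength (m : Int)

def loopAN (l mask i acc : Nat) : Nat :=
  if 1 ≤ i ∧ i ≤ l then loopAN l mask (i <<< 1) (acc ^^^ ((acc <<< i) &&& mask)) else acc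
termination_by l + 1 - i
decreasing_by simp [Nat.shiftLeft_eq]; omega

def loopBN (n a t : Nat) : Nat :=
  if 0 < a then loopBN n (a >>> 1) (t + pcN (a &&& n)) else t
termination_by a
decreasing_by simp [Nat.shiftRight_one]; omega

-- XN x i = XOR of x <<< s over s < i  (the value A's doubling scan accumulates)
def XN (x : Nat) : Nat → Nat
  | 0 => 0
  | (i+1) => XN x i ^^^ (x <<< i)

-- XA a = XOR of a >>> s over all s  (the value whose masked popcount B's loop sums)
def XA (a : Nat) : Nat :=
  if a = 0 then 0 else a ^^^ XA (a >>> 1)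
termination_by a
decreasing_by simp [Nat.shiftRight_one]; omega

lemma pcN_zero' : pcN 0 = 0 := by decide

lemma pcN_step (m : Nat) : pcN m = m % 2 + pcN (m / 2) := by
  rcases Nat.eq_zero_or_pos m with h | h
  · subst h; decide
  · exact PySem.Int.bitCount_natCast h

lemma pcN_xor_parity (x y : Nat) : pcN (x ^^^ y) % 2 = (pcN x + pcN y) % 2 := by
  induction x using Nat.strong_induction_on generalizing y with
  | _ x ih =>
    rcases Nat.eq_zero_or_pos x with h | h
    · subst h
      have h0 : pcN 0 = 0 := by decide
      simp [h0]
    · rw [pcN_step (x ^^^ y), pcN_step x, pcN_step y]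
      have hd : (x ^^^ y) / 2 = x / 2 ^^^ y / 2 := by
        apply Nat.eq_of_testBit_eq; intro i
        simp [Nat.testBit_div_two, Nat.testBit_xor]
      have hm : (x ^^^ y) % 2 = (x % 2 + y % 2) % 2 := by
        have hb := Nat.testBit_zero (x ^^^ y)
        have hb1 := Nat.testBit_zero x
        have hb2 := Nat.testBit_zero y
        rw [Nat.testBit_xor] at hb
        rw [hb1, hb2] at hb
        rcases Nat.mod_two_eq_zero_or_one x with hx | hx <;>
          rcases Nat.mod_two_eq_zero_or_one y with hy | hy <;>
          simp [hx, hy] at hb ⊢ <;> omega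
      rw [hd, hm]
      have := ih (x / 2) (Nat.div_lt_self h (by norm_num)) (y / 2)
      omega

lemma pcN_split (m k : Nat) : pcN m = pcN (m % 2^k) + pcN (m >>> k) := by
  induction k generalizing m with
  | zero => simp only [pow_zero, Nat.mod_one, Nat.shiftRight_zero, pcN_zero', Nat.zero_add]
  | succ k ih =>
    have h1 : (m % 2^(k+1)) % 2 = m % 2 := by
      have h : (2:Nat)^(k+1) = 2 * 2^k := by ring
      rw [h]
      exact Nat.mod_mod_of_dvd m ⟨2^k, by ring⟩
    have h2 : (m % 2^(k+1)) / 2 = (m / 2) % 2^k := by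
      apply Nat.eq_of_testBit_eq; intro i
      rw [Nat.testBit_div_two, Nat.testBit_mod_two_pow, Nat.testBit_mod_two_pow, Nat.testBit_div_two]
      by_cases h : i < k
      · simp [h, show i+1 < k+1 from by omega]
      · simp [h, show ¬(i+1 < k+1) from by omega]
    have h3 : m >>> (k+1) = (m/2) >>> k := by
      rw [show k+1 = 1+k from by omega, Nat.shiftRight_add m 1 k, Nat.shiftRight_one]
    rw [pcN_step m, pcN_step (m % 2^(k+1)), h1, h2, h3, ih (m/2)]
    omega

lemma parN_step (y : Nat) : parN y = ((y.testBit 0) != parN (y / 2)) := by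
  unfold parN
  rw [pcN_step y, Nat.testBit_zero]
  rcases Nat.mod_two_eq_zero_or_one y with h | h <;>
    rcases Nat.mod_two_eq_zero_or_one (pcN (y/2)) with h2 | h2 <;>
    simp [h, h2, Nat.add_mod]

lemma XN_add (x a b : Nat) : XN x (a + b) = XN x a ^^^ (XN x b <<< a) := by
  induction b with
  | zero => simp [XN]
  | succ b ih =>
    have h : a + (b+1) = (a+b) + 1 := by ring
    rw [h]
    show XN x (a+b) ^^^ (x <<< (a+b)) = _
    rw [ih]
    show _ = XN x a ^^^ ((XN x b ^^^ (x <<< b)) <<< a)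
    rw [Nat.shiftLeft_xor_distrib, ← Nat.shiftLeft_add, Nat.xor_assoc, Nat.add_comm b a]

lemma XN_testBit (x i j : Nat) : (XN x i).testBit j = parN ((x % 2^(j+1)) >>> (j + 1 - i)) := by
  induction i with
  | zero =>
    have h0 : (x % 2^(j+1)) >>> (j+1) = 0 := by
      rw [Nat.shiftRight_eq_div_pow]
      exact Nat.div_eq_of_lt (Nat.mod_lt _ (by positivity))
    simp [XN, h0, parN, pcN_zero']
  | succ i ih =>
    show (XN x i ^^^ (x <<< i)).testBit j = _
    rw [Nat.testBit_xor, ih, Nat.testBit_shiftLeft]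
    by_cases hij : i ≤ j
    · rw [parN_step ((x % 2^(j+1)) >>> (j+1-(i+1)))]
      have hb0 : ((x % 2^(j+1)) >>> (j+1-(i+1))).testBit 0 = (x % 2^(j+1)).testBit (j - i) := by
        rw [Nat.testBit_shiftRight]; (congr 1) <;> omega
      have hdiv : ((x % 2^(j+1)) >>> (j+1-(i+1))) / 2 = (x % 2^(j+1)) >>> (j+1-i) := by
        rw [← Nat.shiftRight_one, ← Nat.shiftRight_add]
        (congr 1) <;> omega
      rw [hb0, hdiv]
      have hx : (x % 2^(j+1)).testBit (j - i) = x.testBit (j - i) := by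
        rw [Nat.testBit_mod_two_pow]; simp [show j - i < j + 1 from by omega]
      rw [hx]
      cases x.testBit (j-i) <;> cases parN ((x % 2^(j+1)) >>> (j+1-i)) <;> simp [hij]
    · simp [hij, show j+1-i = j+1-(i+1) from by omega]

lemma XA_testBit (a j : Nat) : (XA a).testBit j = parN (a >>> j) := by
  induction a using Nat.strong_induction_on generalizing j with
  | _ a ih =>
    rcases Nat.eq_zero_or_pos a with h | h
    · subst h; rw [XA]; simp [parN, pcN_zero']
    · rw [XA]
      have hne : ¬ a = 0 := by omega
      rw [if_neg hne, Nat.testBit_xor,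
        ih (a >>> 1) (by simp [Nat.shiftRight_one]; omega) j,
        parN_step (a >>> j)]
      have h1 : (a >>> j).testBit 0 = a.testBit j := by
        rfl
      have h2 : (a >>> j) / 2 = (a >>> 1) >>> j := by
        rw [← Nat.shiftRight_one, ← Nat.shiftRight_add, ← Nat.shiftRight_add]
        (congr 1) <;> omega
      rw [h1, h2]

-- decomposition of a number at bit k
lemma recompose (x k : Nat) : x = (x &&& (2^k - 1)) ^^^ ((x >>> k) <<< k) := by
  apply Nat.eq_of_testBit_eq; intro i
  rw [Nat.testBit_xor, Nat.testBit_and, Nat.testBit_two_pow_sub_one,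
    Nat.testBit_shiftLeft, Nat.testBit_shiftRight]
  by_cases h : i < k
  · simp [h, Nat.not_le.mpr h]
  · have h2 : k + (i - k) = i := by omega
    simp [h, Nat.le_of_not_lt h, h2]

-- one masked step of A's scan, purely algebraically
lemma step_bits (P h k i : Nat) (hh : ∀ j, j < k → h.testBit j = false) :
    ((P &&& (2^k - 1)) ^^^ h) ^^^ ((((P &&& (2^k - 1)) ^^^ h) <<< i) &&& (2^k - 1))
      = ((P ^^^ (P <<< i)) &&& (2^k - 1)) ^^^ h := by
  apply Nat.eq_of_testBit_eq; intro j
  simp only [Nat.testBit_xor, Nat.testBit_and, Nat.testBit_shiftLeft, Nat.testBit_two_pow_sub_one]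
  by_cases hjk : j < k
  · by_cases hij : i ≤ j
    · have h1 : h.testBit j = false := hh j hjk
      have h2 : h.testBit (j - i) = false := hh _ (by omega)
      simp only [hjk, hij, decide_true, h1, h2, show j - i < k from by omega,
        Bool.true_and, Bool.and_true]
      cases P.testBit j <;> cases P.testBit (j - i) <;> simp
    · simp [hjk, hij, hh j hjk]
  · simp [hjk]

-- A's loop maintains acc = (XN acc0 i &&& mask) ^^^ (bits of acc0 above the mask)
lemma loopAN_char (L acc0 : Nat) : ∀ fuel i acc, 1 ≤ i → L + 1 - i ≤ fuel →
    acc = (XN acc0 i &&& (2^(L+1) - 1)) ^^^ ((acc0 >>> (L+1)) <<< (L+1)) →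
    ∃ i', L < i' ∧ loopAN L (2^(L+1) - 1) i acc
      = (XN acc0 i' &&& (2^(L+1) - 1)) ^^^ ((acc0 >>> (L+1)) <<< (L+1)) := by
  intro fuel
  induction fuel with
  | zero =>
    intro i acc h1 hf hacc
    refine ⟨i, by omega, ?_⟩
    rw [loopAN, if_neg (by omega)]
    exact hacc
  | succ fuel ih =>
    intro i acc h1 hf hacc
    by_cases hil : i ≤ L
    · rw [loopAN, if_pos ⟨h1, hil⟩]
      have hstep : acc ^^^ ((acc <<< i) &&& (2^(L+1) - 1))
          = (XN acc0 (i <<< 1) &&& (2^(L+1) - 1)) ^^^ ((acc0 >>> (L+1)) <<< (L+1)) := by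
        have hh : ∀ j, j < L+1 → ((acc0 >>> (L+1)) <<< (L+1)).testBit j = false := by
          intro j hj
          rw [Nat.testBit_shiftLeft]
          simp [show ¬ (L+1 ≤ j) from by omega]
        have h2i : i <<< 1 = i + i := by simp [Nat.shiftLeft_eq]; ring
        rw [hacc, step_bits _ _ _ _ hh, h2i, XN_add]
      rw [hstep]
      obtain ⟨i', hi', heq⟩ := ih (i <<< 1) _ (by simp [Nat.shiftLeft_eq]; omega)
        (by simp [Nat.shiftLeft_eq]; omega) rfl
      exact ⟨i', hi', heq⟩
    · refine ⟨i, by omega, ?_⟩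
      rw [loopAN, if_neg (by omega)]
      exact hacc

-- B's loop computes (mod 2) the popcount of XA a &&& n
lemma loopBN_char (n : Nat) : ∀ a t, loopBN n a t % 2 = (t + pcN (XA a &&& n)) % 2 := by
  intro a
  induction a using Nat.strong_induction_on with
  | _ a ih =>
    intro t
    rcases Nat.eq_zero_or_pos a with h | h
    · subst h
      rw [loopBN, if_neg (by omega), XA]
      simp [pcN_zero']
    · rw [loopBN, if_pos h, ih (a >>> 1) (by rw [Nat.shiftRight_one]; exact Nat.div_lt_self h (by norm_num))]
      rw [show XA a = a ^^^ XA (a >>> 1) from by rw [XA, if_neg (by omega)],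
        Nat.and_xor_distrib_right]
      have := pcN_xor_parity (a &&& n) (XA (a >>> 1) &&& n)
      omega

lemma lt_two_pow_blenN (m : Nat) : m < 2 ^ blenN m := by
  have := PySem.Int.lt_two_pow_bitLength (m : Int)
  simpa using this

lemma testBit_blenN {m j : Nat} (h : blenN m ≤ j) : m.testBit j = false := by
  apply Nat.testBit_lt_two_pow
  calc m < 2 ^ blenN m := lt_two_pow_blenN m
    _ ≤ 2 ^ j := Nat.pow_le_pow_right (by norm_num) h

lemma parN_xor (x y : Nat) : parN (x ^^^ y) = (parN x != parN y) := by
  unfold parN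
  have := pcN_xor_parity x y
  rcases Nat.mod_two_eq_zero_or_one (pcN x) with h1 | h1 <;>
    rcases Nat.mod_two_eq_zero_or_one (pcN y) with h2 | h2 <;>
    simp [h1, h2] <;> omega

-- prefix parity of A's pre-flipped accumulator = parity of the bits of m above j
lemma prefix_parity (m j : Nat) :
    parN ((m ^^^ (pcN m % 2)) % 2^(j+1)) = parN (m >>> (j+1)) := by
  have hmod : (m ^^^ (pcN m % 2)) % 2^(j+1) = (m % 2^(j+1)) ^^^ (pcN m % 2) := by
    apply Nat.eq_of_testBit_eq; intro t
    rw [Nat.testBit_mod_two_pow, Nat.testBit_xor, Nat.testBit_xor, Nat.testBit_mod_two_pow]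
    by_cases ht : t < j+1
    · simp [ht]
    · have hp : (pcN m % 2).testBit t = false := by
        apply Nat.testBit_lt_two_pow
        calc pcN m % 2 < 2 := Nat.mod_lt _ (by norm_num)
          _ = 2^1 := by norm_num
          _ ≤ 2^t := Nat.pow_le_pow_right (by norm_num) (by omega)
      simp [ht, hp]
  rw [hmod, parN_xor]
  have hp2 : parN (pcN m % 2) = parN m := by
    unfold parN
    rcases Nat.mod_two_eq_zero_or_one (pcN m) with h | h <;> rw [h]
    · have h0 : pcN 0 = 0 := pcN_zero'
      simp [h0, h]
    · have h1 : pcN 1 = 1 := by rw [pcN_step 1]; simp [pcN_zero']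
      simp [h1, h]
  rw [hp2]
  unfold parN
  have := pcN_split m (j+1)
  rcases Nat.mod_two_eq_zero_or_one (pcN (m % 2^(j+1))) with h1 | h1 <;>
    rcases Nat.mod_two_eq_zero_or_one (pcN (m >>> (j+1))) with h2 | h2 <;>
    simp [h1, h2] <;> omega

-- the two final accumulators agree after masking with n
lemma final_eq (m n : Nat) :
    ∀ i', min (blenN m) (blenN n) < i' →
    (((XN (m ^^^ (pcN m % 2)) i' &&& (2^(min (blenN m) (blenN n)+1) - 1)) ^^^
      (((m ^^^ (pcN m % 2)) >>> (min (blenN m) (blenN n)+1)) <<< (min (blenN m) (blenN n)+1))) &&& n)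
      = XA (m >>> 1) &&& n := by
  intro i' hi'
  set L := min (blenN m) (blenN n) with hL
  set acc0 := m ^^^ (pcN m % 2) with hacc0
  apply Nat.eq_of_testBit_eq; intro j
  rw [Nat.testBit_and, Nat.testBit_and]
  by_cases hn : n.testBit j = true
  · rw [hn]
    have hXA : (XA (m >>> 1)).testBit j = parN (m >>> (j+1)) := by
      rw [XA_testBit, ← Nat.shiftRight_add]
      congr 2
      omega
    rw [hXA]
    by_cases hjL : j < L + 1
    · rw [Nat.testBit_xor, Nat.testBit_and, Nat.testBit_two_pow_sub_one,
        Nat.testBit_shiftLeft]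
      simp only [hjL, decide_true, show ¬ (L+1 ≤ j) from by omega,
        decide_false, Bool.false_and, Bool.xor_false]
      rw [XN_testBit, show j + 1 - i' = 0 from by omega, Nat.shiftRight_zero]
      simp only [Bool.and_true]
      exact prefix_parity m j
    · have hjn : j < blenN n := by
        by_contra hc
        rw [testBit_blenN (by omega)] at hn
        exact Bool.false_ne_true hn
      have hmj : m.testBit j = false := testBit_blenN (by omega)
      have hacc0j : acc0.testBit j = false := by
        rw [hacc0, Nat.testBit_xor, hmj]
        have hp : (pcN m % 2).testBit j = false := by
          apply Nat.testBit_lt_two_pow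
          calc pcN m % 2 < 2 := Nat.mod_lt _ (by norm_num)
            _ = 2^1 := by norm_num
            _ ≤ 2^j := Nat.pow_le_pow_right (by norm_num) (by omega)
        simp [hp]
      have hF : ((XN acc0 i' &&& (2^(L+1) - 1)) ^^^ ((acc0 >>> (L+1)) <<< (L+1))).testBit j = false := by
        rw [Nat.testBit_xor, Nat.testBit_and, Nat.testBit_two_pow_sub_one,
          Nat.testBit_shiftLeft, Nat.testBit_shiftRight]
        simp only [hjL, decide_false, Bool.and_false, Bool.false_xor,
          show L+1 ≤ j from by omega, decide_true, Bool.true_and]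
        rw [show L + 1 + (j - (L+1)) = j from by omega]
        exact hacc0j
      rw [hF]
      have hm0 : m >>> (j+1) = 0 := by
        rw [Nat.shiftRight_eq_div_pow]
        apply Nat.div_eq_of_lt
        calc m < 2 ^ blenN m := lt_two_pow_blenN m
          _ ≤ 2 ^ (j+1) := Nat.pow_le_pow_right (by norm_num) (by omega)
      rw [hm0]
      simp [parN, pcN_zero']
  · simp at hn
    simp [hn]

-- Int-to-Nat bridges for the two loops
lemma loopA_cast (l : Nat) (mask : Nat) : ∀ fuel i (acc : Nat), l + 1 - i ≤ fuel →
    blademulLoopA l (mask : Int) i (acc : Int) = ((loopAN l mask i acc : Nat) : Int) := by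
  intro fuel
  induction fuel with
  | zero =>
    intro i acc hf
    rw [blademulLoopA, loopAN]
    by_cases h : 1 ≤ i ∧ i ≤ l
    · omega
    · rw [if_neg h, if_neg h]
  | succ fuel ih =>
    intro i acc hf
    rw [blademulLoopA, loopAN]
    by_cases h : 1 ≤ i ∧ i ≤ l
    · rw [if_pos h, if_pos h]
      have hc : ((acc : Int) <<< i) = ((acc <<< i : Nat) : Int) := rfl
      rw [hc, PySem.Int.band_natCast, PySem.Int.bxor_natCast]
      exact ih (i <<< 1) _ (by simp [Nat.shiftLeft_eq]; omega)
    · rw [if_neg h, if_neg h]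

lemma loopB_cast (n : Nat) : ∀ (a t : Nat),
    blademulLoopB (n : Int) (a : Int) (t : Int) = ((loopBN n a t : Nat) : Int) := by
  intro a
  induction a using Nat.strong_induction_on with
  | _ a ih =>
    intro t
    rw [blademulLoopB, loopBN]
    by_cases h : 0 < a
    · rw [if_pos (by exact_mod_cast h), if_pos h]
      have hc : ((a : Int) >>> (1:Nat)) = ((a >>> 1 : Nat) : Int) := rfl
      have hb : PySem.Int.band (a : Int) (n : Int) = ((a &&& n : Nat) : Int) :=
        PySem.Int.band_natCast a n
      rw [hc, hb]
      have hadd : ((t : Int) + (pcN (a &&& n) : Int)) = ((t + pcN (a &&& n) : Nat) : Int) := by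
        push_cast; ring
      rw [show (PySem.Int.bitCount ((a &&& n : Nat) : Int) : Int) = (pcN (a &&& n) : Int) from rfl, hadd]
      exact ih (a >>> 1) (by rw [Nat.shiftRight_one]; exact Nat.div_lt_self h (by norm_num)) _
    · rw [if_neg (by exact_mod_cast h), if_neg h]

theorem blademul6_main (b1 b2 : Int) (h1 : 0 ≤ b1) (h2 : 0 ≤ b2) :
    blademul6 b1 b2 = blademul6_alt b1 b2 := by
  lift b1 to Nat using h1 with m
  lift b2 to Nat using h2 with n
  simp only [blademul6, blademul6_alt]
  have hbc : PySem.Int.bitCount (m : Int) = pcN m := rfl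
  have hband1 : PySem.Int.band ((pcN m : Nat) : Int) 1 = ((pcN m % 2 : Nat) : Int) := by
    have h := PySem.Int.band_natCast (pcN m) 1
    rw [show ((1:Nat):Int) = (1:Int) from rfl] at h
    rw [h, Nat.and_one_is_mod]
  have hacc0 : PySem.Int.bxor (m : Int) ((pcN m % 2 : Nat) : Int)
      = ((m ^^^ pcN m % 2 : Nat) : Int) := PySem.Int.bxor_natCast m (pcN m % 2)
  have hL : min (PySem.Int.bitLength (m : Int)) (PySem.Int.bitLength (n : Int))
      = min (blenN m) (blenN n) := rfl
  set L := min (blenN m) (blenN n) with hLdef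
  have hmask : ((2 <<< L : Nat) : Int) - 1 = ((2^(L+1) - 1 : Nat) : Int) := by
    have h2L : (2 <<< L : Nat) = 2^(L+1) := by
      rw [Nat.shiftLeft_eq, pow_succ]; ring
    rw [h2L]
    have : (1:Nat) ≤ 2^(L+1) := Nat.one_le_two_pow
    push_cast [this]
    ring
  rw [hbc, hband1, hacc0, hL, hmask]
  set acc0 := m ^^^ pcN m % 2 with hacc0def
  rw [loopA_cast L _ (L + 1) 1 acc0 (by omega)]
  obtain ⟨i', hi', heq⟩ := loopAN_char L acc0 (L + 1) 1 acc0 (by omega) (by omega)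
    (by
      have h1' : XN acc0 1 = acc0 := by
        show XN acc0 0 ^^^ (acc0 <<< 0) = acc0
        simp [XN]
      rw [h1']
      exact recompose acc0 (L+1))
  rw [heq]
  rw [PySem.Int.band_natCast, show (PySem.Int.bitCount ((_ &&& n : Nat) : Int) : Int)
      = ((pcN ((XN acc0 i' &&& (2^(L+1) - 1) ^^^ acc0 >>> (L+1) <<< (L+1)) &&& n) : Nat) : Int) from rfl]
  have hAfin : PySem.Int.band ((pcN ((XN acc0 i' &&& (2^(L+1) - 1) ^^^ acc0 >>> (L+1) <<< (L+1)) &&& n) : Nat) : Int) 1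
      = ((pcN ((XN acc0 i' &&& (2^(L+1) - 1) ^^^ acc0 >>> (L+1) <<< (L+1)) &&& n) % 2 : Nat) : Int) := by
    rw [show ((1:Int)) = ((1:Nat):Int) from rfl, PySem.Int.band_natCast, Nat.and_one_is_mod]
  rw [hAfin]
  have hshift : ((m : Int) >>> (1:Nat)) = ((m >>> 1 : Nat) : Int) := rfl
  rw [hshift, show ((0:Int)) = ((0:Nat):Int) from rfl, loopB_cast n (m >>> 1) 0]
  have hBfin : PySem.Int.band ((loopBN n (m >>> 1) 0 : Nat) : Int) 1
      = ((loopBN n (m >>> 1) 0 % 2 : Nat) : Int) := by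
    rw [show ((1:Int)) = ((1:Nat):Int) from rfl, PySem.Int.band_natCast, Nat.and_one_is_mod]
  rw [hBfin]
  have hB := loopBN_char n (m >>> 1) 0
  rw [Nat.zero_add] at hB
  have hF := final_eq m n i' hi'
  rw [← hLdef] at hF
  rw [← hacc0def] at hF
  congr 1
  rw [hB, hF]

-- ===== VERDICT (by name: the statement is the Claim_ definition above) =====
theorem blademul6_spec : Claim_equal_blademul6 := by
  intro b1 b2 _ hpre
  exact blademul6_main b1 b2 hpre.1 hpre.2
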